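-- pv_equiv track=rewrite | github.com/M-Naghavi-2022/Mapsa_DjangoPrecamp_Exercises | 05. Nowrooz/Q3. khosh_tarif string.py | khosh_tarif
-- ===== SOURCE A (Python) =====
-- def khosh_tarif(str):
--
--     for i in range(len(str)-1):         # cheks if the input string contains two similar neighbor digits
--         if ((str[i] == '0') and (str[i+1] == '0')) or ((str[i] == '1') and (str[i+1] == '1')):
--             return('Bad tarif')
--         else:
--             continue
--
--     tmp1 = '0'                          # creates two desired patterns with the same length as input string, tmp1 begins with '0' and tmp2 begins with '1'
--     tmp2 = '1'
--     for i in range(len(str)-1):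
--         if tmp1[i] == '0':
--             tmp1 += '1'
--             tmp2 += '0'
--         else:
--             tmp1 += '0'
--             tmp2 += '1'
--
--     flag = False
--     for i in range(len(str)):           # compares and matches the input string's characters to tmp1
--         if str[i] != '?':
--             if str[i] == tmp1[i]:
--                 flag = True
--             else:
--                 flag = False
--                 break
--
--     if flag == True:
--         return('Khosh Tarif')
--     else:
--         for i in range(len(str)):       # compares and matches the input string's characters to tmp2
--             if str[i] != '?':
--                 if str[i] == tmp2[i]:
--                     continue
--                 else:
--                     return('Bad tarif')
--         return('Khosh Tarif')
-- ===== SOURCE B (Python) =====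
-- def khosh_tarif(str):
--     # Single pass: infer the one admissible phase (expected bit at position 0)
--     # instead of materializing both reference patterns.
--     expected = None
--     for i, c in enumerate(str):
--         if c == '?':
--             continue
--         if c != '0' and c != '1':
--             return 'Bad tarif'
--         base = c if i % 2 == 0 else ('1' if c == '0' else '0')
--         if expected is None:
--             expected = base
--         elif expected != base:
--             return 'Bad tarif'
--     return 'Khosh Tarif'
-- ===== Notes on version B (the rewrite author's own statement) =====
-- stated objective: faster
-- what changed: B replaces A's four passes (adjacency scan, construction of both reference strings 0101.. and 1010.., and two comparison passes) with one pass over enumerate(s) that infers the single admissible alternating phase from each non-'?' character.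
import Mathlib
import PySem

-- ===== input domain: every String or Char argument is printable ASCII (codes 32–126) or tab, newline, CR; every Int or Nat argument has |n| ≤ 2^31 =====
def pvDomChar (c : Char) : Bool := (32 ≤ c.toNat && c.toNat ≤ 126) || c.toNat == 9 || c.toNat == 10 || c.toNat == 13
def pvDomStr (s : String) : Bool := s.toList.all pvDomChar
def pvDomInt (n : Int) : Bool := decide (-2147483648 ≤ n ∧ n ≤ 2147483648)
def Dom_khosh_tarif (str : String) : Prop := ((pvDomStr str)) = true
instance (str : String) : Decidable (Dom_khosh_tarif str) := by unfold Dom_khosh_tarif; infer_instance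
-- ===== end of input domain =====

-- B replaces A's four passes (adjacency scan, building both reference patterns, two
-- comparison passes) with a single pass that infers the one admissible alternating phase.

-- ===== PORT A =====
-- All list indices below come from range(...) and are always in range, so Python's
-- str[i] is ported exactly by pyGetD with an arbitrary default (never reached).

-- first loop of A: early return 'Bad tarif' on two equal neighbouring digits
def ktAdjLoop (cs : List Char) : List Int → Bool
  | [] => false
  | i :: rest =>
    if ((PySem.List.pyGetD cs i ' ' = '0') ∧ (PySem.List.pyGetD cs (i+1) ' ' = '0')) ∨
       ((PySem.List.pyGetD cs i ' ' = '1') ∧ (PySem.List.pyGetD cs (i+1) ' ' = '1')) then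
      true
    else ktAdjLoop cs rest

-- second loop of A: grow tmp1/tmp2 character by character
def ktBuild : List Int → List Char × List Char → List Char × List Char
  | [], tp => tp
  | i :: rest, (t1, t2) =>
    if PySem.List.pyGetD t1 i ' ' = '0' then ktBuild rest (t1 ++ ['1'], t2 ++ ['0'])
    else ktBuild rest (t1 ++ ['0'], t2 ++ ['1'])

-- third loop of A: flag-setting comparison against tmp1, break on mismatch
def ktFlagLoop (cs t1 : List Char) : List Int → Bool → Bool
  | [], flag => flag
  | i :: rest, flag =>
    if PySem.List.pyGetD cs i ' ' ≠ '?' then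
      if PySem.List.pyGetD cs i ' ' = PySem.List.pyGetD t1 i ' ' then ktFlagLoop cs t1 rest true
      else false
    else ktFlagLoop cs t1 rest flag

-- fourth loop of A: comparison against tmp2, early return 'Bad tarif' on mismatch
def ktLoop2 (cs t2 : List Char) : List Int → Bool
  | [] => true
  | i :: rest =>
    if PySem.List.pyGetD cs i ' ' ≠ '?' then
      if PySem.List.pyGetD cs i ' ' = PySem.List.pyGetD t2 i ' ' then ktLoop2 cs t2 rest
      else false
    else ktLoop2 cs t2 rest

def khosh_tarif (str : String) : String :=
  let cs := str.toList
  let n : Int := cs.length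
  if ktAdjLoop cs (PySem.List.pyRange 0 (n - 1) 1) then "Bad tarif"
  else
    let tp := ktBuild (PySem.List.pyRange 0 (n - 1) 1) (['0'], ['1'])
    let flag := ktFlagLoop cs tp.1 (PySem.List.pyRange 0 n 1) false
    if flag then "Khosh Tarif"
    else if ktLoop2 cs tp.2 (PySem.List.pyRange 0 n 1) then "Khosh Tarif"
    else "Bad tarif"

-- ===== PORT B =====
def ktBase (i : Nat) (c : Char) : Char :=
  if i % 2 = 0 then c else (if c = '0' then '1' else '0')

-- single pass of B over the characters, carrying the index and the inferred phase
def ktAltLoop (exp : Option Char) (i : Nat) : List Char → Bool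
  | [] => true
  | c :: t =>
    if c = '?' then ktAltLoop exp (i+1) t
    else if c ≠ '0' ∧ c ≠ '1' then false
    else
      let base := ktBase i c
      match exp with
      | none => ktAltLoop (some base) (i+1) t
      | some e => if e ≠ base then false else ktAltLoop (some e) (i+1) t

def khosh_tarif_alt (str : String) : String :=
  if ktAltLoop none 0 str.toList then "Khosh Tarif" else "Bad tarif"

-- ===== PRECONDITION & SPEC =====
def Spec_khosh_tarif (str : String) (out : String) : Prop := out = khosh_tarif_alt str
instance (str : String) (out : String) : Decidable (Spec_khosh_tarif str out) := by unfold Spec_khosh_tarif; infer_instance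

-- ===== CLAIM (what is proved, stated in full; the proofs are below) =====
def Claim_equal_khosh_tarif : Prop := ∀ (str : String), Dom_khosh_tarif str → Spec_khosh_tarif str (khosh_tarif str)

-- ===== LEMMAS AND PROOFS =====

-- the alternating reference character at position i (ktPat false = tmp1, ktPat true = tmp2)
def ktPat (b : Bool) (i : Nat) : Char :=
  if i % 2 = 0 then (if b then '1' else '0') else (if b then '0' else '1')

-- "every non-'?' character of t matches pattern b starting at absolute position s"
def ktMatch (b : Bool) : Nat → List Char → Bool
  | _, [] => true
  | s, c :: t => (c == '?' || c == ktPat b s) && ktMatch b (s+1) t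

theorem ktPat_ne_q (b : Bool) (s : Nat) : ktPat b s ≠ '?' := by
  rcases Nat.mod_two_eq_zero_or_one s with hs | hs <;> cases b <;> simp [ktPat, hs]

theorem ktAltLoop_some0 : ∀ (t : List Char) (s : Nat),
    ktAltLoop (some '0') s t = ktMatch false s t := by
  intro t
  induction t with
  | nil => intro s; simp [ktAltLoop, ktMatch]
  | cons c t ih =>
    intro s
    rcases Nat.mod_two_eq_zero_or_one s with hs | hs <;>
    · by_cases hq : c = '?'
      · subst hq; simp [ktAltLoop, ktMatch, ktPat, hs, ih]
      · by_cases h0 : c = '0'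
        · subst h0; simp [ktAltLoop, ktMatch, ktBase, ktPat, hs, ih]
        · by_cases h1 : c = '1'
          · subst h1; simp [ktAltLoop, ktMatch, ktBase, ktPat, hs, ih]
          · simp [ktAltLoop, ktMatch, ktPat, hs, hq, h0, h1]

theorem ktAltLoop_some1 : ∀ (t : List Char) (s : Nat),
    ktAltLoop (some '1') s t = ktMatch true s t := by
  intro t
  induction t with
  | nil => intro s; simp [ktAltLoop, ktMatch]
  | cons c t ih =>
    intro s
    rcases Nat.mod_two_eq_zero_or_one s with hs | hs <;>
    · by_cases hq : c = '?'
      · subst hq; simp [ktAltLoop, ktMatch, ktPat, hs, ih]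
      · by_cases h0 : c = '0'
        · subst h0; simp [ktAltLoop, ktMatch, ktBase, ktPat, hs, ih]
        · by_cases h1 : c = '1'
          · subst h1; simp [ktAltLoop, ktMatch, ktBase, ktPat, hs, ih]
          · simp [ktAltLoop, ktMatch, ktPat, hs, hq, h0, h1]

theorem ktAltLoop_none : ∀ (t : List Char) (s : Nat),
    ktAltLoop none s t = (ktMatch false s t || ktMatch true s t) := by
  intro t
  induction t with
  | nil => intro s; simp [ktAltLoop, ktMatch]
  | cons c t ih =>
    intro s
    rcases Nat.mod_two_eq_zero_or_one s with hs | hs <;>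
    · by_cases hq : c = '?'
      · subst hq; simp [ktAltLoop, ktMatch, ktPat, hs, ih]
      · by_cases h0 : c = '0'
        · subst h0
          simp [ktAltLoop, ktMatch, ktBase, ktPat, hs, ktAltLoop_some0, ktAltLoop_some1]
        · by_cases h1 : c = '1'
          · subst h1
            simp [ktAltLoop, ktMatch, ktBase, ktPat, hs, ktAltLoop_some0, ktAltLoop_some1]
          · simp [ktAltLoop, ktMatch, ktPat, hs, hq, h0, h1]

theorem ktMatch_all_q (b : Bool) : ∀ (t : List Char) (s : Nat),
    t.any (fun c => c != '?') = false → ktMatch b s t = true := by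
  intro t
  induction t with
  | nil => intro s _; simp [ktMatch]
  | cons c t ih =>
    intro s h
    simp only [List.any_cons, Bool.or_eq_false_iff, bne_eq_false_iff_eq] at h
    obtain ⟨hc, ht⟩ := h
    subst hc
    simp [ktMatch, ih _ ht]

theorem ktBuild_inv : ∀ (k s : Nat),
    ktBuild ((List.range' s k).map (fun (j : Nat) => (j : Int)))
      ((List.range (s+1)).map (ktPat false), (List.range (s+1)).map (ktPat true))
    = ((List.range (s+k+1)).map (ktPat false), (List.range (s+k+1)).map (ktPat true)) := by
  intro k
  induction k with
  | zero => intro s; simp [ktBuild]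
  | succ k ih =>
    intro s
    rw [List.range'_succ, List.map_cons]
    have hget : PySem.List.pyGetD ((List.range (s+1)).map (ktPat false)) (s : Int) ' '
        = ktPat false s := by
      simp [List.getD_eq_getElem?_getD]
    have h1 : (List.range (s+1)).map (ktPat false) ++ [ktPat false (s+1)]
        = (List.range (s+2)).map (ktPat false) := by
      simp [List.range_succ]
    have h2 : (List.range (s+1)).map (ktPat true) ++ [ktPat true (s+1)]
        = (List.range (s+2)).map (ktPat true) := by
      simp [List.range_succ]
    have harr : s + 1 + k + 1 = s + (k + 1) + 1 := by omega
    rcases Nat.mod_two_eq_zero_or_one s with hs | hs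
    · have hp : ktPat false s = '0' := by simp [ktPat, hs]
      have hp1 : ktPat false (s+1) = '1' := by
        have : (s+1) % 2 = 1 := by omega
        simp [ktPat, this]
      have hp2 : ktPat true (s+1) = '0' := by
        have : (s+1) % 2 = 1 := by omega
        simp [ktPat, this]
      rw [ktBuild, if_pos (by rw [hget, hp])]
      rw [show ['1'] = [ktPat false (s+1)] from by rw [hp1],
          show ['0'] = [ktPat true (s+1)] from by rw [hp2], h1, h2]
      rw [ih (s+1), harr]
    · have hp : ktPat false s = '1' := by simp [ktPat, hs]
      have hp1 : ktPat false (s+1) = '0' := by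
        have : (s+1) % 2 = 0 := by omega
        simp [ktPat, this]
      have hp2 : ktPat true (s+1) = '1' := by
        have : (s+1) % 2 = 0 := by omega
        simp [ktPat, this]
      rw [ktBuild, if_neg (by rw [hget, hp]; decide)]
      rw [show ['0'] = [ktPat false (s+1)] from by rw [hp1],
          show ['1'] = [ktPat true (s+1)] from by rw [hp2], h1, h2]
      rw [ih (s+1), harr]

theorem ktGetD_pat (b : Bool) (n s : Nat) (h : s < n) :
    PySem.List.pyGetD ((List.range n).map (ktPat b)) (s : Int) ' ' = ktPat b s := by
  simp [List.getD_eq_getElem?_getD, h]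

theorem ktGetD_elem (cs : List Char) (s : Nat) (h : s < cs.length) :
    PySem.List.pyGetD cs (s : Int) ' ' = cs[s] := by
  simp [List.getD_eq_getElem?_getD, List.getElem?_eq_getElem h]

theorem ktLoop2_inv : ∀ (k s : Nat) (cs : List Char), s + k = cs.length →
    ktLoop2 cs ((List.range cs.length).map (ktPat true)) ((List.range' s k).map (fun (j : Nat) => (j : Int)))
      = ktMatch true s (cs.drop s) := by
  intro k
  induction k with
  | zero =>
    intro s cs h
    have : cs.drop s = [] := by
      apply List.drop_eq_nil_of_le; omega
    simp [ktLoop2, this, ktMatch]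
  | succ k ih =>
    intro s cs h
    have hs : s < cs.length := by omega
    rw [List.range'_succ, List.map_cons]
    have hdrop : cs.drop s = cs[s] :: cs.drop (s+1) := List.drop_eq_getElem_cons hs
    rw [ktLoop2, ktGetD_elem cs s hs, ktGetD_pat true cs.length s hs, hdrop]
    have ih' := ih (s+1) cs (by omega)
    by_cases hq : cs[s] = '?'
    · rw [if_neg (by simp [hq])]
      simp [ktMatch, hq, ih']
    · rw [if_pos hq]
      by_cases hm : cs[s] = ktPat true s
      · rw [if_pos hm]
        simp [ktMatch, hm, ih']
      · rw [if_neg hm]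
        simp [ktMatch, hq, hm]

theorem ktFlagLoop_inv : ∀ (k s : Nat) (cs : List Char) (flag : Bool), s + k = cs.length →
    ktFlagLoop cs ((List.range cs.length).map (ktPat false)) ((List.range' s k).map (fun (j : Nat) => (j : Int))) flag
      = (ktMatch false s (cs.drop s) && (flag || (cs.drop s).any (fun c => c != '?'))) := by
  intro k
  induction k with
  | zero =>
    intro s cs flag h
    have : cs.drop s = [] := by
      apply List.drop_eq_nil_of_le; omega
    simp [ktFlagLoop, this, ktMatch]
  | succ k ih =>
    intro s cs flag h
    have hs : s < cs.length := by omega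
    rw [List.range'_succ, List.map_cons]
    have hdrop : cs.drop s = cs[s] :: cs.drop (s+1) := List.drop_eq_getElem_cons hs
    rw [ktFlagLoop, ktGetD_elem cs s hs, ktGetD_pat false cs.length s hs, hdrop]
    have ih' := fun fl => ih (s+1) cs fl (by omega)
    by_cases hq : cs[s] = '?'
    · rw [if_neg (by simp [hq])]
      simp [ktMatch, hq, ih' flag]
    · rw [if_pos hq]
      by_cases hm : cs[s] = ktPat false s
      · rw [if_pos hm]
        simp [ktMatch, hm, ih' true, ktPat_ne_q]
      · rw [if_neg hm]
        simp [ktMatch, hq, hm]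

theorem ktAdj_inv : ∀ (k s : Nat) (cs : List Char), s + k + 1 = cs.length →
    ktAdjLoop cs ((List.range' s k).map (fun (j : Nat) => (j : Int))) = true →
    ktMatch false s (cs.drop s) = false ∧ ktMatch true s (cs.drop s) = false := by
  intro k
  induction k with
  | zero => intro s cs _ hadj; simp [ktAdjLoop] at hadj
  | succ k ih =>
    intro s cs h hadj
    have hs : s < cs.length := by omega
    have hs1 : s + 1 < cs.length := by omega
    rw [List.range'_succ, List.map_cons, ktAdjLoop] at hadj
    have hcast : (s : Int) + 1 = ((s + 1 : Nat) : Int) := by push_cast; ring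
    have hdrop : cs.drop s = cs[s] :: cs.drop (s+1) := List.drop_eq_getElem_cons hs
    have hdrop1 : cs.drop (s+1) = cs[s+1] :: cs.drop (s+2) := List.drop_eq_getElem_cons hs1
    by_cases hc : ((PySem.List.pyGetD cs (s : Int) ' ' = '0') ∧ (PySem.List.pyGetD cs ((s : Int)+1) ' ' = '0')) ∨
        ((PySem.List.pyGetD cs (s : Int) ' ' = '1') ∧ (PySem.List.pyGetD cs ((s : Int)+1) ' ' = '1'))
    · rw [ktGetD_elem cs s hs, hcast, ktGetD_elem cs (s+1) hs1] at hc
      constructor <;>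
      · rw [hdrop, hdrop1]
        rcases hc with ⟨h1, h2⟩ | ⟨h1, h2⟩ <;>
          · rw [h1, h2]
            rcases Nat.mod_two_eq_zero_or_one s with hp | hp <;>
              · have hp1 : (s+1) % 2 = 1 - s % 2 := by omega
                simp [ktMatch, ktPat, hp, hp1]
    · rw [if_neg hc] at hadj
      obtain ⟨h0, h1⟩ := ih (s+1) cs (by omega) hadj
      constructor <;>
      · rw [hdrop]
        simp [ktMatch, h0, h1]

theorem ktRangeNat (m : Nat) :
    PySem.List.pyRange 0 (m : Int) 1 = (List.range' 0 m).map (fun (j : Nat) => (j : Int)) := by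
  rw [PySem.List.pyRange_one, ← List.range_eq_range']
  simp

theorem khosh_eq (str : String) : khosh_tarif str = khosh_tarif_alt str := by
  simp only [khosh_tarif, khosh_tarif_alt]
  rw [ktAltLoop_none]
  set cs := str.toList with hcs
  rcases Nat.eq_zero_or_pos cs.length with hn | hn
  · have hnil : cs = [] := List.eq_nil_of_length_eq_zero hn
    rw [hnil]
    simp only [List.length_nil, Nat.cast_zero]
    rw [PySem.List.pyRange_one_eq_nil (by norm_num),
        show PySem.List.pyRange 0 0 1 = [] from PySem.List.pyRange_one_eq_nil (by norm_num)]
    simp [ktAdjLoop, ktFlagLoop, ktLoop2, ktMatch]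
  · have hc1 : ((cs.length : Int) - 1) = ((cs.length - 1 : Nat) : Int) := by omega
    rw [hc1, ktRangeNat (cs.length - 1), ktRangeNat cs.length]
    have hb := ktBuild_inv (cs.length - 1) 0
    have hone : (List.range (0+1)).map (ktPat false) = ['0'] := by decide
    have hone' : (List.range (0+1)).map (ktPat true) = ['1'] := by decide
    rw [hone, hone'] at hb
    have hlen : 0 + (cs.length - 1) + 1 = cs.length := by omega
    rw [hlen] at hb
    have hrange0 : List.range' 0 cs.length = List.range cs.length := (List.range_eq_range').symm
    by_cases hadj : ktAdjLoop cs ((List.range' 0 (cs.length - 1)).map (fun (j : Nat) => (j : Int))) = true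
    · obtain ⟨h0, h1⟩ := ktAdj_inv (cs.length - 1) 0 cs (by omega) hadj
      rw [List.drop_zero] at h0 h1
      simp [hadj, h0, h1]
    · rw [if_neg (by simp [hadj])]
      simp only [hb]
      rw [ktFlagLoop_inv cs.length 0 cs false (by omega),
          ktLoop2_inv cs.length 0 cs (by omega)]
      rw [List.drop_zero]
      by_cases hm1 : ktMatch true 0 cs = true
      · by_cases hm0 : ktMatch false 0 cs = true <;> simp [hm0, hm1]
      · have hm1' : ktMatch true 0 cs = false := by
          cases h : ktMatch true 0 cs
          · rfl
          · exact absurd h hm1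
        by_cases hm0 : ktMatch false 0 cs = true
        · have hq : cs.any (fun c => c != '?') = true := by
            cases h : cs.any (fun c => c != '?')
            · exact absurd (ktMatch_all_q true cs 0 h) hm1
            · rfl
          simp [hm0, hm1', hq]
        · have hm0' : ktMatch false 0 cs = false := by
            cases h : ktMatch false 0 cs
            · rfl
            · exact absurd h hm0
          simp [hm0', hm1']

-- ===== VERDICT (by name: the statement is the Claim_ definition above) =====
theorem khosh_tarif_spec : Claim_equal_khosh_tarif := by
  intro str _
  unfold Spec_khosh_tarif
  exact khosh_eq str
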